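-- pv_equiv track=rewrite | github.com/alexpfernandes/adventofcode2020 | advent-day-06.py | questionparser
-- ===== SOURCE A (Python) =====
-- def questionparser(questions):
--     group = []
--     parties = []
--     for line in questions:
--         if line == '':
--             parties.append(group)
--             group = []
--         else:
--             group.append(line)
--     if group not in []:
--         parties.append(group)
--     return parties
-- ===== SOURCE B (Python) =====
-- def questionparser(questions):
--     idx = [i for i, line in enumerate(questions) if line == '']
--     parties = []
--     start = 0
--     for sep in idx:
--         parties.append(questions[start:sep])
--         start = sep + 1
--     parties.append(questions[start:])
--     return parties
-- ===== Notes on version B (the rewrite author's own statement) =====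
-- stated objective: alternative
-- what changed: Replaces A's streaming per-line group accumulator with a two-pass scheme: first collect the positions of blank-line separators, then emit the slices between consecutive separators (plus the unconditional final tail slice).
import Mathlib
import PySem

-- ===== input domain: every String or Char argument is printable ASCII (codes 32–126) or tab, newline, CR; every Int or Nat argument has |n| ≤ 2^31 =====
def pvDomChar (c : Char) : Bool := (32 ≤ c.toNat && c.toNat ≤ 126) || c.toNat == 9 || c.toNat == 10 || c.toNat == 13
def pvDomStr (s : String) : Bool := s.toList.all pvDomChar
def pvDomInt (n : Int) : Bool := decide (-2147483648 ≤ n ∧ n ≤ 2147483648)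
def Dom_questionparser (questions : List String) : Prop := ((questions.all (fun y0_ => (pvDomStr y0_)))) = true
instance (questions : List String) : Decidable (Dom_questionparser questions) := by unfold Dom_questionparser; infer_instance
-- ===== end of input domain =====

-- B replaces A's streaming per-line group accumulator with a two-pass scheme (separator
-- positions first, then slices between them) — an alternative decomposition, same cost.


-- ===== PORT A =====
-- literal port of A: one pass with a (group, parties) accumulator;
-- 'if group not in []' is always true, so the final flush is unconditional
def questionparser (questions : List String) : List (List String) :=
  let st := questions.foldl
    (fun (st : List String × List (List String)) line =>
      if line == "" then ([], st.2 ++ [st.1]) else (st.1 ++ [line], st.2))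
    ([], [])
  st.2 ++ [st.1]

-- ===== PORT B =====
-- literal port of B: separator indices via enumerate, then slices between them
def questionparser_alt (questions : List String) : List (List String) :=
  let idx : List Int :=
    ((PySem.List.enumerate questions 0).filter (fun p => p.2 == "")).map (fun p => p.1)
  let st := idx.foldl
    (fun (st : Int × List (List String)) sep =>
      (sep + 1, st.2 ++ [PySem.List.slice questions (some st.1) (some sep)]))
    (0, [])
  st.2 ++ [PySem.List.slice questions (some st.1) none]

-- ===== PRECONDITION & SPEC =====
def Spec_questionparser (questions : List String) (out : List (List String)) : Prop := out = questionparser_alt questions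
instance (questions : List String) (out : List (List String)) : Decidable (Spec_questionparser questions out) := by unfold Spec_questionparser; infer_instance

-- ===== CLAIM (what is proved, stated in full; the proofs are below) =====
def Claim_equal_questionparser : Prop := ∀ (questions : List String), Dom_questionparser questions → Spec_questionparser questions (questionparser questions)

-- ===== LEMMAS AND PROOFS =====

-- reference splitter: groups of lines between blank separators
def splitAux : List String → List String → List (List String)
  | [], g => [g]
  | l :: ls, g => if l = "" then g :: splitAux ls [] else splitAux ls (g ++ [l])

-- nat positions of the blank lines
def sepIdx : List String → List Nat
  | [] => []
  | l :: ls => if l = "" then 0 :: (sepIdx ls).map (· + 1) else (sepIdx ls).map (· + 1)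

lemma sepIdx_cons_sep (ls : List String) :
    sepIdx ("" :: ls) = 0 :: (sepIdx ls).map (· + 1) := by simp [sepIdx]

lemma sepIdx_cons_ne (l : String) (ls : List String) (h : l ≠ "") :
    sepIdx (l :: ls) = (sepIdx ls).map (· + 1) := by simp [sepIdx, h]

-- A's fold equals the reference splitter
lemma A_eq_splitAux (qs : List String) : ∀ (g : List String) (ps : List (List String)),
    (let st := qs.foldl
        (fun (st : List String × List (List String)) line =>
          if line == "" then ([], st.2 ++ [st.1]) else (st.1 ++ [line], st.2))
        (g, ps)
     st.2 ++ [st.1]) = ps ++ splitAux qs g := by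
  induction qs with
  | nil => intro g ps; simp [splitAux]
  | cons l ls ih =>
    intro g ps
    by_cases h : l = ""
    · simp only [List.foldl_cons, h, splitAux, if_pos, beq_self_eq_true]
      simpa using ih [] (ps ++ [g])
    · simp only [List.foldl_cons, splitAux, if_neg h, beq_iff_eq]
      simpa [h] using ih (g ++ [l]) ps

-- B's separator-index list is sepIdx, shifted by the enumerate start
lemma enum_filter_eq_sepIdx (qs : List String) : ∀ (s : Int),
    ((PySem.List.enumerate qs s).filter (fun p => p.2 == "")).map (fun p => p.1)
      = (sepIdx qs).map (fun (k : Nat) => s + (k : Int)) := by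
  induction qs with
  | nil => intro s; simp [PySem.List.enumerate_nil, sepIdx]
  | cons l ls ih =>
    intro s
    rw [PySem.List.enumerate_cons]
    by_cases h : l = ""
    · subst h
      rw [List.filter_cons_of_pos (by simp), List.map_cons, ih (s + 1),
        sepIdx_cons_sep, List.map_cons, List.map_map]
      congr 1
      · simp
      · apply List.map_congr_left; intro k _
        simp only [Function.comp_apply]; push_cast; ring
    · rw [List.filter_cons_of_neg (by simp [h]), ih (s + 1), sepIdx_cons_ne l ls h,
        List.map_map]
      apply List.map_congr_left; intro k _
      simp only [Function.comp_apply]; push_cast; ring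

-- B's slicing fold over the shifted separator indices equals the reference splitter
lemma B_fold_eq_splitAux (qs : List String) :
    ∀ (pre mid : List String) (ps : List (List String)),
    (((sepIdx qs).map (fun (k : Nat) => ((pre.length + mid.length + k : Nat) : Int))).foldl
        (fun (st : Int × List (List String)) sep =>
          (sep + 1, st.2 ++ [PySem.List.slice (pre ++ mid ++ qs) (some st.1) (some sep)]))
        ((pre.length : Int), ps)).2
      ++ [PySem.List.slice (pre ++ mid ++ qs)
            (some (((sepIdx qs).map (fun (k : Nat) => ((pre.length + mid.length + k : Nat) : Int))).foldl
              (fun (st : Int × List (List String)) sep =>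
                (sep + 1, st.2 ++ [PySem.List.slice (pre ++ mid ++ qs) (some st.1) (some sep)]))
              ((pre.length : Int), ps)).1) none]
      = ps ++ splitAux qs mid := by
  induction qs with
  | nil =>
    intro pre mid ps
    simp only [sepIdx, List.map_nil, List.foldl_nil, List.append_nil, splitAux,
      PySem.List.slice_from_natCast, List.drop_left]
  | cons l ls ih =>
    intro pre mid ps
    by_cases h : l = ""
    · subst h
      have hsl : PySem.List.slice (pre ++ mid ++ "" :: ls) (some (pre.length : Int))
          (some ((pre.length + mid.length : Nat) : Int)) = mid := by
        rw [PySem.List.slice_natCast, List.append_assoc, List.drop_left,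
          Nat.add_sub_cancel_left]
        exact List.take_left
      have hmap : ((sepIdx ls).map (· + 1)).map
            (fun (k : Nat) => ((pre.length + mid.length + k : Nat) : Int))
          = (sepIdx ls).map
            (fun (k : Nat) => (((pre ++ mid ++ [""]).length + ([] : List String).length + k : Nat) : Int)) := by
        rw [List.map_map]; apply List.map_congr_left; intro k _
        simp only [Function.comp_apply, List.length_append, List.length_nil,
          List.length_cons]
        omega
      have hst : ((pre.length + mid.length : Nat) : Int) + 1
          = (((pre ++ mid ++ [""]).length : Nat) : Int) := by
        simp only [List.length_append, List.length_cons, List.length_nil]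
        push_cast; ring
      have harr : pre ++ mid ++ "" :: ls = pre ++ mid ++ [""] ++ [] ++ ls := by simp
      rw [sepIdx_cons_sep]
      simp only [List.map_cons, List.foldl_cons, Nat.add_zero, hsl]
      rw [hmap, hst, harr, ih (pre ++ mid ++ [""]) [] (ps ++ [mid])]
      simp [splitAux]
    · have hmap : ((sepIdx ls).map (· + 1)).map
            (fun (k : Nat) => ((pre.length + mid.length + k : Nat) : Int))
          = (sepIdx ls).map
            (fun (k : Nat) => ((pre.length + (mid ++ [l]).length + k : Nat) : Int)) := by
        rw [List.map_map]; apply List.map_congr_left; intro k _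
        simp only [Function.comp_apply, List.length_append, List.length_cons,
          List.length_nil]
        omega
      have harr : pre ++ mid ++ l :: ls = pre ++ (mid ++ [l]) ++ ls := by simp
      rw [sepIdx_cons_ne l ls h, hmap, harr, ih pre (mid ++ [l]) ps]
      simp [splitAux, h]

-- ===== VERDICT (by name: the statement is the Claim_ definition above) =====
theorem questionparser_spec : Claim_equal_questionparser := by
  intro qs _
  show questionparser qs = questionparser_alt qs
  have hA : questionparser qs = splitAux qs [] := by
    simpa [questionparser] using A_eq_splitAux qs [] []
  have hB : questionparser_alt qs = splitAux qs [] := by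
    unfold questionparser_alt
    rw [enum_filter_eq_sepIdx qs 0]
    have h := B_fold_eq_splitAux qs [] [] []
    simp only [List.nil_append, List.length_nil, Nat.cast_zero, zero_add] at h ⊢
    exact h
  rw [hA, hB]
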